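-- pv_equiv track=rewrite | github.com/euxcet/db_toolchain | todo/train/data_utils.py | index_sequence
-- ===== SOURCE A (Python) =====
-- def index_sequence(data:list, seq:list) -> int|None:
--   for i in range(len(data) - len(seq) + 1):
--     valid = True
--     for j in range(len(seq)):
--       if data[i + j] != seq[j]:
--         valid = False
--         break
--     if valid:
--       return i
--   return None
-- ===== SOURCE B (Python) =====
-- def index_sequence(data: list, seq: list) -> int | None:
--   m = len(seq)
--   if m == 0:
--     return 0
--   limit = len(data) - m
--   if limit < 0:
--     return None
--   first = seq[0]
--   rest = seq[1:]
--   i = -1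
--   while True:
--     try:
--       i = data.index(first, i + 1, limit + 1)
--     except ValueError:
--       return None
--     if data[i + 1:i + m] == rest:
--       return i
-- ===== Notes on version B (the rewrite author's own statement) =====
-- stated objective: alternative
-- what changed: B replaces the inner element-by-element window scan over every position by jumping directly between occurrences of seq[0] (list.index on a bounded window) and checking each candidate with a single slice comparison.
import Mathlib
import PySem

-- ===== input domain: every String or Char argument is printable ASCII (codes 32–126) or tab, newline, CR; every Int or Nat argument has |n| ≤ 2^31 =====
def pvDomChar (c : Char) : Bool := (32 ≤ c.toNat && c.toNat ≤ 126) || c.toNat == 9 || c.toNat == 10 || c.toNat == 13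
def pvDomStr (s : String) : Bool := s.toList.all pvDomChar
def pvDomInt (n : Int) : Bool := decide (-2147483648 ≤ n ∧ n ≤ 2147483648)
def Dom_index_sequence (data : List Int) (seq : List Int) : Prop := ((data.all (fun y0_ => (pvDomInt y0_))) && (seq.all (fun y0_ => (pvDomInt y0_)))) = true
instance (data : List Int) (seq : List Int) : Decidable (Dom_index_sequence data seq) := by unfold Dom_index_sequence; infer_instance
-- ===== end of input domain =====

-- B changes the search: instead of testing every window element-by-element, it jumps between
-- occurrences of seq[0] (Python: list.index over a bounded window) and compares the remainder
-- by one slice comparison; same worst-case cost, a different traversal of the data.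

-- ===== PORT A =====
-- inner 'for j in range(len(seq))' with early break; data[i+j]/seq[j] via pyGet?
-- (A only reaches in-range indices, where pyGet? = the Python indexing exactly)
def pvAInner (data seq : List Int) (i : Int) : List Int → Bool
  | [] => true
  | j :: js =>
    if PySem.List.pyGet? data (i + j) ≠ PySem.List.pyGet? seq j then false
    else pvAInner data seq i js

-- outer 'for i in range(len(data) - len(seq) + 1)' with early return
def pvAOuter (data seq : List Int) : List Int → Option Int
  | [] => none
  | i :: rest =>
    if pvAInner data seq i (PySem.List.pyRange 0 (seq.length : Int) 1) then some i
    else pvAOuter data seq rest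

def index_sequence (data : List Int) (seq : List Int) : Option Int :=
  pvAOuter data seq (PySem.List.pyRange 0 ((data.length : Int) - (seq.length : Int) + 1) 1)

-- ===== PORT B =====
-- port of data.index(v, start, stop): first index of v in the window (exact: list.index scans
-- left to right and raises ValueError ↦ none)
def pvFindIn : List Int → Int → Option Nat
  | [], _ => none
  | x :: r, v => if x = v then some 0 else (pvFindIn r v).map (· + 1)

-- the 'while True' loop of B; fuel only makes the recursion structural (each pass advances
-- start by at least 1 and start never exceeds limit+1, so fuel = limit+1 is never exhausted)
def pvBLoop (data : List Int) (first : Int) (rest : List Int) (m limit : Nat) :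
    Nat → Nat → Option Int
  | 0, _ => none
  | fuel + 1, start =>
    match pvFindIn ((data.drop start).take (limit + 1 - start)) first with
    | none => none
    | some d =>
      let j := start + d
      if PySem.List.slice data (some ((j : Int) + 1)) (some ((j : Int) + (m : Int))) = rest
      then some (j : Int)
      else pvBLoop data first rest m limit fuel (j + 1)

def index_sequence_alt (data : List Int) (seq : List Int) : Option Int :=
  match seq with
  | [] => some 0   -- m == 0
  | first :: rest =>  -- first = seq[0], rest = seq[1:]
    if (data.length : Int) - (seq.length : Int) < 0 then none   -- limit < 0
    else
      pvBLoop data first rest seq.length (data.length - seq.length)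
        (data.length - seq.length + 1) 0

-- ===== PRECONDITION & SPEC =====
def Spec_index_sequence (data : List Int) (seq : List Int) (out : Option Int) : Prop := out = index_sequence_alt data seq
instance (data : List Int) (seq : List Int) (out : Option Int) : Decidable (Spec_index_sequence data seq out) := by unfold Spec_index_sequence; infer_instance

-- ===== CLAIM (what is proved, stated in full; the proofs are below) =====
def Claim_equal_index_sequence : Prop := ∀ (data : List Int) (seq : List Int), Dom_index_sequence data seq → Spec_index_sequence data seq (index_sequence data seq)

-- ===== LEMMAS AND PROOFS =====

def pvFF (data seq : List Int) : Nat → Nat → Option Nat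
  | _, 0 => none
  | start, c + 1 =>
    if (data.drop start).take seq.length = seq then some start
    else pvFF data seq (start + 1) c

lemma pvFindIn_none (xs : List Int) (v : Int) :
    pvFindIn xs v = none ↔ ∀ t : Nat, xs[t]? ≠ some v := by
  induction xs with
  | nil => simp [pvFindIn]
  | cons x r ih =>
    by_cases hx : x = v
    · subst hx
      simp only [pvFindIn]
      constructor
      · intro h; cases h
      · intro h; exact absurd (show (x :: r)[0]? = some x by simp) (h 0)
    · simp only [pvFindIn, if_neg hx, Option.map_eq_none_iff, ih]
      constructor
      · intro h t
        cases t with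
        | zero => simpa using hx
        | succ t => simpa using h t
      · intro h t; simpa using h (t + 1)

lemma pvFindIn_some (xs : List Int) (v : Int) :
    ∀ d, pvFindIn xs v = some d →
      d < xs.length ∧ xs[d]? = some v ∧ ∀ t, t < d → xs[t]? ≠ some v := by
  induction xs with
  | nil => intro d h; simp [pvFindIn] at h
  | cons x r ih =>
    intro d h
    by_cases hx : x = v
    · simp only [pvFindIn, if_pos hx] at h
      cases h
      exact ⟨by simp, by simpa using hx, by omega⟩
    · simp only [pvFindIn, if_neg hx, Option.map_eq_some_iff] at h
      obtain ⟨d', hd', rfl⟩ := h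
      obtain ⟨h1, h2, h3⟩ := ih d' hd'
      refine ⟨by simpa using h1, by simpa using h2, ?_⟩
      intro t ht
      cases t with
      | zero => simpa using hx
      | succ t => simpa using h3 t (by omega)

lemma pvAInner_eq (data seq : List Int) (i : Nat)
    (hin : i + seq.length ≤ data.length) :
    ∀ c a, a + c = seq.length →
      pvAInner data seq (i : Int) (PySem.List.pyRange (a : Int) (seq.length : Int) 1) =
        decide ((data.drop (i + a)).take c = seq.drop a) := by
  intro c
  induction c with
  | zero =>
    intro a ha
    rw [PySem.List.pyRange_one_eq_nil (by omega)]
    have h1 : seq.drop a = [] := by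
      apply List.drop_eq_nil_of_le; omega
    simp [pvAInner, h1]
  | succ c ih =>
    intro a ha
    have haA : a < seq.length := by omega
    have hiA : i + a < data.length := by omega
    rw [PySem.List.pyRange_one_cons (by exact_mod_cast haA)]
    have e1 : (i : Int) + (a : Int) = ((i + a : Nat) : Int) := by push_cast; ring
    have e2 : ((a : Int) + 1) = ((a + 1 : Nat) : Int) := by push_cast; ring
    simp only [pvAInner, e1, e2, PySem.List.pyGet?_natCast]
    rw [List.getElem?_eq_getElem hiA, List.getElem?_eq_getElem haA]
    rw [List.drop_eq_getElem_cons hiA, List.drop_eq_getElem_cons haA, List.take_succ_cons]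
    by_cases heq : data[i + a] = seq[a]
    · rw [if_neg (by simp [heq])]
      rw [ih (a + 1) (by omega)]
      simp only [List.cons.injEq, heq, true_and, Nat.add_assoc]
    · rw [if_pos (by simp [heq])]
      simp only [List.cons.injEq, heq, false_and, decide_false]

lemma pvAOuter_eq (data seq : List Int) (b : Int)
    (hb : b = (data.length : Int) - (seq.length : Int) + 1) :
    ∀ c (a : Nat), (b - (a : Int)).toNat = c →
    pvAOuter data seq (PySem.List.pyRange (a : Int) b 1) =
      (pvFF data seq a c).map Int.ofNat := by
  intro c
  induction c with
  | zero =>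
    intro a ha
    rw [PySem.List.pyRange_one_eq_nil (by omega)]
    simp [pvAOuter, pvFF]
  | succ c ih =>
    intro a ha
    have hab : (a : Int) < b := by omega
    have hin : a + seq.length ≤ data.length := by omega
    rw [PySem.List.pyRange_one_cons hab]
    have hz : (0 : Int) = ((0 : Nat) : Int) := by norm_num
    simp only [pvAOuter, hz]
    rw [pvAInner_eq data seq a hin seq.length 0 (by omega)]
    simp only [Nat.add_zero, List.drop_zero]
    by_cases hmatch : (data.drop a).take seq.length = seq
    · simp only [pvFF, hmatch, decide_true, if_true]
      rfl
    · simp only [pvFF, hmatch, decide_false, Bool.false_eq_true, if_false]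
      have e2 : ((a : Int) + 1) = ((a + 1 : Nat) : Int) := by push_cast; ring
      rw [e2, ih (a + 1) (by omega)]

lemma pvFF_skip (data seq : List Int) (K : Nat) :
    ∀ c (start : Nat), start + c ≤ K →
      (∀ p, start ≤ p → p < start + c → ¬ ((data.drop p).take seq.length = seq)) →
      pvFF data seq start (K - start) = pvFF data seq (start + c) (K - (start + c)) := by
  intro c
  induction c with
  | zero => intro start _ _; rfl
  | succ c ih =>
    intro start hK hno
    have h1 : K - start = (K - (start + 1)) + 1 := by omega
    rw [h1]
    simp only [pvFF, hno start le_rfl (by omega), if_false]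
    have := ih (start + 1) (by omega) (fun p hp1 hp2 => hno p (by omega) (by omega))
    rw [show start + 1 + c = start + (c+1) by omega] at this
    exact this

lemma pvMatchHead (data : List Int) (first : Int) (rest : List Int) (p : Nat)
    (h : (data.drop p).take (rest.length + 1) = first :: rest) :
    data[p]? = some first := by
  have h0 := congrArg (fun l => l[0]?) h
  simpa [List.getElem?_take, List.getElem?_drop] using h0

lemma pvMatchAt_iff (data : List Int) (first : Int) (rest : List Int) (j : Nat)
    (hj : j < data.length) :
    (data.drop j).take (rest.length + 1) = first :: rest ↔
      data[j]? = some first ∧ (data.drop (j + 1)).take rest.length = rest := by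
  rw [List.drop_eq_getElem_cons hj, List.take_succ_cons, List.cons.injEq,
    List.getElem?_eq_getElem hj]
  simp

lemma pvBLoop_eq (data : List Int) (first : Int) (rest : List Int)
    (hn : rest.length + 1 ≤ data.length) :
    ∀ fuel start, start ≤ data.length - (rest.length + 1) + 1 →
      data.length - (rest.length + 1) + 1 - start ≤ fuel →
      pvBLoop data first rest (rest.length + 1) (data.length - (rest.length + 1))
          fuel start =
        (pvFF data (first :: rest) start
            (data.length - (rest.length + 1) + 1 - start)).map Int.ofNat := by
  set n := data.length with hnn
  set limit := n - (rest.length + 1) with hlimit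
  intro fuel
  induction fuel with
  | zero =>
    intro start hs hf
    rw [show limit + 1 - start = 0 by omega]
    simp [pvBLoop, pvFF]
  | succ fuel ih =>
    intro start hs hf
    have hwlen : ((data.drop start).take (limit + 1 - start)).length = limit + 1 - start := by
      simp; omega
    -- no-match transfer: positions p with data[p]? ≠ some first cannot match
    have hnomatch : ∀ p : Nat, data[p]? ≠ some first →
        ¬ ((data.drop p).take (first :: rest).length = first :: rest) := by
      intro p hp hcon
      exact hp (pvMatchHead data first rest p (by simpa using hcon))
    have hwget : ∀ t : Nat, t < limit + 1 - start →
        ((data.drop start).take (limit + 1 - start))[t]? = data[start + t]? := by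
      intro t ht
      rw [List.getElem?_take]
      simp [ht, List.getElem?_drop]
    simp only [pvBLoop]
    cases hfind : pvFindIn ((data.drop start).take (limit + 1 - start)) first with
    | none =>
      have hnone := (pvFindIn_none _ _).mp hfind
      have hskip := pvFF_skip data (first :: rest) (limit + 1) (limit + 1 - start) start
        (by omega)
        (by
          intro p hp1 hp2
          apply hnomatch
          have ht : p - start < limit + 1 - start := by omega
          have := hwget (p - start) ht
          rw [show start + (p - start) = p by omega] at this
          rw [← this]
          exact hnone (p - start))
      show (none : Option Int) = _
      rw [hskip, show limit + 1 - (start + (limit + 1 - start)) = 0 by omega]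
      simp [pvFF]
    | some d =>
      obtain ⟨hdlen, hdval, hdmin⟩ := pvFindIn_some _ _ d hfind
      rw [hwlen] at hdlen
      have hj : start + d ≤ limit := by omega
      have hjn : start + d < n := by omega
      have hjval : data[start + d]? = some first := by
        rw [← hwget d (by omega)]; exact hdval
      have hnom_lt : ∀ p : Nat, start ≤ p → p < start + d →
          ¬ ((data.drop p).take (first :: rest).length = first :: rest) := by
        intro p hp1 hp2
        apply hnomatch
        have := hwget (p - start) (by omega)
        rw [show start + (p - start) = p by omega] at this
        rw [← this]
        exact hdmin (p - start) (by omega)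
      have e1 : ((start + d : Nat) : Int) + 1 = ((start + d + 1 : Nat) : Int) := by push_cast; ring
      have e2 : ((start + d : Nat) : Int) + ((rest.length + 1 : Nat) : Int) =
          ((start + d + (rest.length + 1) : Nat) : Int) := by push_cast; ring
      have hslice : PySem.List.slice data (some (((start + d : Nat) : Int) + 1))
            (some (((start + d : Nat) : Int) + ((rest.length + 1 : Nat) : Int))) =
          (data.drop (start + d + 1)).take rest.length := by
        rw [e1, e2, PySem.List.slice_natCast,
          show start + d + (rest.length + 1) - (start + d + 1) = rest.length by omega]
      show (if PySem.List.slice data _ _ = rest then _ else _) = _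
      rw [hslice]
      by_cases htail : (data.drop (start + d + 1)).take rest.length = rest
      · rw [if_pos htail]
        have hmatch : (data.drop (start + d)).take (first :: rest).length = first :: rest := by
          simp only [List.length_cons]
          exact (pvMatchAt_iff data first rest (start + d) hjn).mpr ⟨hjval, htail⟩
        have hskip := pvFF_skip data (first :: rest) (limit + 1) d start (by omega) hnom_lt
        rw [hskip, show limit + 1 - (start + d) = (limit - (start + d)) + 1 by omega]
        simp only [pvFF, hmatch, if_pos]
        rfl
      · rw [if_neg htail]
        have hnomj : ¬ ((data.drop (start + d)).take (first :: rest).length = first :: rest) := by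
          simp only [List.length_cons]
          intro hcon
          exact htail ((pvMatchAt_iff data first rest (start + d) hjn).mp hcon).2
        have hskip := pvFF_skip data (first :: rest) (limit + 1) (d + 1) start (by omega)
          (by
            intro p hp1 hp2
            by_cases hpd : p < start + d
            · exact hnom_lt p hp1 hpd
            · rw [show p = start + d by omega]; exact hnomj)
        rw [ih (start + d + 1) (by omega) (by omega)]
        rw [hskip, show start + (d + 1) = start + d + 1 by omega]

-- ===== VERDICT (by name: the statement is the Claim_ definition above) =====
theorem index_sequence_spec : Claim_equal_index_sequence := by
  intro data seq _
  unfold Spec_index_sequence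
  have hA : index_sequence data seq =
      (pvFF data seq 0 (((data.length : Int) - (seq.length : Int) + 1).toNat)).map Int.ofNat := by
    unfold index_sequence
    have h := pvAOuter_eq data seq ((data.length : Int) - (seq.length : Int) + 1) rfl
      (((data.length : Int) - (seq.length : Int) + 1).toNat) 0 (by norm_num)
    simpa using h
  rw [hA]
  cases seq with
  | nil =>
    have hc : (((data.length : Int)) - (([] : List Int).length : Int) + 1).toNat
        = data.length + 1 := by simp
    rw [hc]
    simp [pvFF, index_sequence_alt]
  | cons first rest =>
    by_cases hlt : (data.length : Int) - (((first :: rest) : List Int).length : Int) < 0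
    · have hc : (((data.length : Int)) - (((first :: rest) : List Int).length : Int) + 1).toNat
          = 0 := by simp only [List.length_cons] at hlt ⊢; omega
      rw [hc]
      simp only [pvFF, Option.map_none]
      simp only [List.length_cons] at hlt
      simp only [index_sequence_alt, List.length_cons]
      rw [if_pos (by push_cast; omega)]
    · have hn : rest.length + 1 ≤ data.length := by
        simp only [List.length_cons] at hlt; omega
      have halt : index_sequence_alt data (first :: rest) =
          pvBLoop data first rest (rest.length + 1) (data.length - (rest.length + 1))
            (data.length - (rest.length + 1) + 1) 0 := by
        simp only [List.length_cons] at hlt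
        simp only [index_sequence_alt, List.length_cons]
        rw [if_neg (by push_cast; omega)]
      rw [halt, pvBLoop_eq data first rest hn _ 0 (by omega) (by omega)]
      have hc : (((data.length : Int)) - (((first :: rest) : List Int).length : Int) + 1).toNat
          = data.length - (rest.length + 1) + 1 - 0 := by
        simp only [List.length_cons]; omega
      rw [hc]
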